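-- pv_equiv track=rewrite | github.com/areisigma/hex-to-shellcode-converter | hex_to_shellcode.py | parse
-- ===== SOURCE A (Python) =====
-- def parse(hex):
--         shellStr = ""
--
--         for i in range(len(hex)):
--                 if (i+1)%2 != 0:
--                         shellStr = shellStr + "\\x" + str(hex[i])
--                 else:
--                         shellStr = shellStr + str(hex[i])
--         return shellStr
-- ===== SOURCE B (Python) =====
-- def parse(hex):
--     pairs = []
--     for i in range(0, len(hex), 2):
--         pairs.append("\\x" + str(hex[i]) + (str(hex[i + 1]) if i + 1 < len(hex) else ""))
--     return "".join(pairs)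
-- ===== Notes on version B (the rewrite author's own statement) =====
-- stated objective: simpler
-- what changed: Replaces the per-character loop with a parity branch by a step-2 loop that emits one '\x'-prefixed two-character group per iteration, collected in a list and joined at the end.
import Mathlib
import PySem

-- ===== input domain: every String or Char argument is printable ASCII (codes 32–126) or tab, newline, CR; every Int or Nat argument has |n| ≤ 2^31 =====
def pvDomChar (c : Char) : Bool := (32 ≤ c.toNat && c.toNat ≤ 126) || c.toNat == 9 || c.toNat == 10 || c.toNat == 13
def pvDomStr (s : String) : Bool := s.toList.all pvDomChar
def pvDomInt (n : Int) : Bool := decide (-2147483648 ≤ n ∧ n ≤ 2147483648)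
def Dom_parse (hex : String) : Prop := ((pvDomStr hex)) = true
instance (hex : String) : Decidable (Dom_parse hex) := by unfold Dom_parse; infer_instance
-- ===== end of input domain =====

-- B replaces A's per-character loop with its parity branch by a step-2 loop emitting one
-- '\x'-prefixed two-character group per iteration, joined at the end (objective: simpler).

-- ===== PORT A =====
-- 'for i in range(len(hex)): … hex[i] …' ported as a fold over the characters paired with
-- their index (same values, same order, same accumulated string).
def parse (hex : String) : String :=
  hex.toList.zipIdx.foldl
    (fun shellStr ci =>
      if (ci.2 + 1) % 2 ≠ 0 then shellStr ++ "\\x" ++ String.ofList [ci.1]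
      else shellStr ++ String.ofList [ci.1]) ""

-- ===== PORT B =====
-- the loop 'for i in range(0, len(hex), 2)' of Source B, as recursion on the index stepping by 2
def parseGroups (l : List Char) (i : Nat) : List String :=
  if h : i < l.length then
    ("\\x" ++ String.ofList [l[i]] ++
      (if h2 : i + 1 < l.length then String.ofList [l[i + 1]] else ""))
      :: parseGroups l (i + 2)
  else []
termination_by l.length - i

def parse_alt (hex : String) : String :=
  String.join (parseGroups hex.toList 0)

-- ===== PRECONDITION & SPEC =====
def Spec_parse (hex : String) (out : String) : Prop := out = parse_alt hex
instance (hex : String) (out : String) : Decidable (Spec_parse hex out) := by unfold Spec_parse; infer_instance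

-- ===== CLAIM (what is proved, stated in full; the proofs are below) =====
def Claim_equal_parse : Prop := ∀ (hex : String), Dom_parse hex → Spec_parse hex (parse hex)

-- ===== LEMMAS AND PROOFS =====

-- the common shape of both outputs as a character list
def spine : List Char → List Char
  | [] => []
  | [a] => '\\' :: 'x' :: [a]
  | a :: b :: r => '\\' :: 'x' :: a :: b :: spine r

-- the groups B builds, expressed on the suffix being processed
def groupsOf : List Char → List String
  | [] => []
  | [a] => ["\\x" ++ String.ofList [a]]
  | a :: b :: r => ("\\x" ++ String.ofList [a] ++ String.ofList [b]) :: groupsOf r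

theorem foldl_append_str (l : List String) : ∀ acc : String,
    List.foldl (fun r s => r ++ s) acc l = acc ++ String.ofList (l.flatMap String.toList) := by
  induction l with
  | nil => intro acc; simp
  | cons a t ih =>
    intro acc
    simp only [List.foldl_cons, ih, List.flatMap_cons]
    rw [← String.ofList_toList (s := acc ++ a)]
    simp [String.append_assoc]

theorem bsx : ("\\x" : String) = String.ofList ['\\', 'x'] := rfl

theorem parse_fold (l : List Char) : ∀ (k : Nat) (acc : String),
    (l.zipIdx (2 * k)).foldl
      (fun shellStr ci =>
        if (ci.2 + 1) % 2 ≠ 0 then shellStr ++ "\\x" ++ String.ofList [ci.1]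
        else shellStr ++ String.ofList [ci.1]) acc
      = acc ++ String.ofList (spine l) := by
  induction l using spine.induct with
  | case1 => intro k acc; simp [spine]
  | case2 a =>
    intro k acc
    simp only [List.zipIdx, List.foldl_cons, List.foldl_nil]
    rw [if_pos (by omega : (2 * k + 1) % 2 ≠ 0)]
    rw [← String.ofList_toList (s := acc)]
    simp only [spine, String.append_assoc]
    rw [bsx]
    simp only [← String.ofList_append]
    congr 1
  | case3 a b r ih =>
    intro k acc
    rw [List.zipIdx_cons, List.zipIdx_cons,
      show 2 * k + 1 + 1 = 2 * (k + 1) from by omega]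
    simp only [List.foldl_cons]
    rw [if_pos (by omega : (2 * k + 1) % 2 ≠ 0),
      if_neg (by omega : ¬ (2 * k + 1 + 1) % 2 ≠ 0)]
    rw [ih (k + 1)]
    rw [← String.ofList_toList (s := acc)]
    simp only [spine, String.append_assoc]
    rw [bsx]
    simp only [← String.ofList_append]
    congr 1

theorem parseGroups_eq (l : List Char) : ∀ (i : Nat),
    parseGroups l i = groupsOf (l.drop i) := by
  intro i
  induction hn : l.length - i using Nat.strong_induction_on generalizing i with
  | _ n ih =>
    rw [parseGroups]
    by_cases h : i < l.length
    · rw [List.drop_eq_getElem_cons h]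
      by_cases h2 : i + 1 < l.length
      · rw [List.drop_eq_getElem_cons h2]
        rw [show l.drop (i + 1 + 1) = l.drop (i + 2) from rfl]
        rw [ih (l.length - (i + 2)) (by omega) (i + 2) rfl]
        simp [h, h2, groupsOf]
      · have : l.drop (i + 1) = [] := by
          apply List.drop_eq_nil_of_le; omega
        rw [parseGroups, dif_neg (by omega : ¬ i + 2 < l.length)]
        simp [h, h2, this, groupsOf]
    · have : l.drop i = [] := by apply List.drop_eq_nil_of_le; omega
      simp [h, this, groupsOf]

theorem groupsOf_flat (m : List Char) :
    (groupsOf m).flatMap String.toList = spine m := by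
  induction m using spine.induct with
  | case1 => simp [groupsOf, spine]
  | case2 a => simp [groupsOf, spine, bsx]
  | case3 a b r ih => simp [groupsOf, spine, bsx, ih]

-- ===== VERDICT (by name: the statement is the Claim_ definition above) =====
theorem parse_spec : Claim_equal_parse := by
  intro hex _
  unfold Spec_parse parse parse_alt String.join
  have hA := parse_fold hex.toList 0 ""
  rw [Nat.mul_zero] at hA
  rw [hA, parseGroups_eq, List.drop_zero, foldl_append_str, groupsOf_flat]
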